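-- pv_equiv track=rewrite | github.com/haojames/Code_Python | Exec_95.py | compute_sequence
-- ===== SOURCE A (Python) =====
-- def compute_sequence(k_values):
--     if k_values == 1 or k_values == 2 or k_values == 3:
--         return 1
--     a, b ,c = 1,1,1
--     for _ in range(4, k_values + 1):
--         next_val = c + a
--         a, b, c = b, c, next_val
--     return c
-- ===== SOURCE B (Python) =====
-- def compute_sequence(k_values):
--     # a(n) = a(n-1) + a(n-3), a(1)=a(2)=a(3)=1; matrix fast exponentiation.
--     if k_values <= 3:
--         return 1
--
--     def mul(X, Y):
--         return tuple(
--             tuple(sum(X[i][t] * Y[t][j] for t in range(3)) for j in range(3))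
--             for i in range(3)
--         )
--
--     M = ((0, 1, 0), (0, 0, 1), (1, 0, 1))
--     R = ((1, 0, 0), (0, 1, 0), (0, 0, 1))
--     e = k_values - 3
--     while e:
--         if e & 1:
--             R = mul(R, M)
--         M = mul(M, M)
--         e >>= 1
--     # result = third component of R applied to the initial vector (1,1,1)
--     return R[2][0] + R[2][1] + R[2][2]
-- ===== Notes on version B (the rewrite author's own statement) =====
-- stated objective: faster
-- what changed: Replaces the O(n) linear recurrence loop with 3x3 matrix fast exponentiation (square-and-multiply on the exponent k-3); intended as faster; a timing run measured B ahead at the largest sizes but could not confirm the threshold.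
import Mathlib
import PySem

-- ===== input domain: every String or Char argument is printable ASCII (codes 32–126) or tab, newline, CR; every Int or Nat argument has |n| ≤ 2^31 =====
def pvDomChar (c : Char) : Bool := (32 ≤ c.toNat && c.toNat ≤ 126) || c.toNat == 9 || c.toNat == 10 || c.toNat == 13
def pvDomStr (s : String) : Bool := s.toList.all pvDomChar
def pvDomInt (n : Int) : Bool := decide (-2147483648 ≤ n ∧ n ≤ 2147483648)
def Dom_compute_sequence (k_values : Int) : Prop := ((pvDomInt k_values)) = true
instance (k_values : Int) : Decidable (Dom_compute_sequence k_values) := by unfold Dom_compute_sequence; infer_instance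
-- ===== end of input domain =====

-- B replaces A's linear recurrence loop by 3x3 matrix fast exponentiation (square-and-multiply);
-- intended as faster (fewer big-int operations); a timing run's measurement is recorded in its report.

-- ===== PORT A =====
-- literal transliteration: the guard, then the for-loop over range(4, k+1) on state (a,b,c)
def compute_sequence (k_values : Int) : Int :=
  if k_values = 1 ∨ k_values = 2 ∨ k_values = 3 then 1
  else
    let s := (PySem.List.pyRange 4 (k_values + 1) 1).foldl
      (fun (s : Int × Int × Int) _ => (s.2.1, s.2.2, s.2.2 + s.1)) (1, 1, 1)
    s.2.2

-- ===== PORT B =====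
-- 3x3 integer matrix (row-major entries)
structure Mat3 where
  m00 : Int
  m01 : Int
  m02 : Int
  m10 : Int
  m11 : Int
  m12 : Int
  m20 : Int
  m21 : Int
  m22 : Int
deriving DecidableEq, Repr

def m3mul (X Y : Mat3) : Mat3 :=
  ⟨X.m00*Y.m00 + X.m01*Y.m10 + X.m02*Y.m20,
   X.m00*Y.m01 + X.m01*Y.m11 + X.m02*Y.m21,
   X.m00*Y.m02 + X.m01*Y.m12 + X.m02*Y.m22,
   X.m10*Y.m00 + X.m11*Y.m10 + X.m12*Y.m20,
   X.m10*Y.m01 + X.m11*Y.m11 + X.m12*Y.m21,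
   X.m10*Y.m02 + X.m11*Y.m12 + X.m12*Y.m22,
   X.m20*Y.m00 + X.m21*Y.m10 + X.m22*Y.m20,
   X.m20*Y.m01 + X.m21*Y.m11 + X.m22*Y.m21,
   X.m20*Y.m02 + X.m21*Y.m12 + X.m22*Y.m22⟩

def matM : Mat3 := ⟨0, 1, 0, 0, 0, 1, 1, 0, 1⟩
def matI : Mat3 := ⟨1, 0, 0, 0, 1, 0, 0, 0, 1⟩

-- the while-loop of Source B: square-and-multiply on the exponent e
def powAux (R M : Mat3) (e : Nat) : Mat3 :=
  if e = 0 then R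
  else powAux (if e % 2 = 1 then m3mul R M else R) (m3mul M M) (e / 2)
decreasing_by exact Nat.div_lt_self (Nat.pos_of_ne_zero (by assumption)) (by norm_num)

def compute_sequence_alt (k_values : Int) : Int :=
  if k_values ≤ 3 then 1
  else
    let R := powAux matI matM (k_values - 3).toNat
    R.m20 + R.m21 + R.m22

-- ===== PRECONDITION & SPEC =====
def Spec_compute_sequence (k_values : Int) (out : Int) : Prop := out = compute_sequence_alt k_values
instance (k_values : Int) (out : Int) : Decidable (Spec_compute_sequence k_values out) := by unfold Spec_compute_sequence; infer_instance

-- ===== CLAIM (what is proved, stated in full; the proofs are below) =====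
def Claim_equal_compute_sequence : Prop := ∀ (k_values : Int), Dom_compute_sequence k_values → Spec_compute_sequence k_values (compute_sequence k_values)

-- ===== LEMMAS AND PROOFS =====

-- plain power of a matrix, the specification of powAux
def m3pow (M : Mat3) : Nat → Mat3
  | 0 => matI
  | n + 1 => m3mul M (m3pow M n)

theorem m3mul_one_left (X : Mat3) : m3mul matI X = X := by
  cases X; simp [m3mul, matI]

theorem m3mul_one_right (X : Mat3) : m3mul X matI = X := by
  cases X; simp [m3mul, matI]

theorem m3mul_assoc (X Y Z : Mat3) :
    m3mul (m3mul X Y) Z = m3mul X (m3mul Y Z) := by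
  cases X; cases Y; cases Z
  simp only [m3mul, Mat3.mk.injEq]
  refine ⟨?_, ?_, ?_, ?_, ?_, ?_, ?_, ?_, ?_⟩ <;> ring

theorem m3pow_sq (M : Mat3) (n : Nat) :
    m3pow (m3mul M M) n = m3pow M (2 * n) := by
  induction n with
  | zero => rfl
  | succ n ih =>
    have : 2 * (n + 1) = (2 * n + 1) + 1 := by ring
    rw [this]
    simp only [m3pow, ih]
    rw [m3mul_assoc]

theorem powAux_eq (e : Nat) : ∀ R M : Mat3, powAux R M e = m3mul R (m3pow M e) := by
  induction e using Nat.strong_induction_on with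
  | _ e ih =>
    intro R M
    rw [powAux]
    by_cases h0 : e = 0
    · simp [h0, m3pow, m3mul_one_right]
    · simp only [h0, if_false]
      rw [ih (e / 2) (Nat.div_lt_self (Nat.pos_of_ne_zero h0) (by norm_num))]
      rw [m3pow_sq]
      by_cases hodd : e % 2 = 1
      · have he : 2 * (e / 2) + 1 = e := by omega
        simp only [hodd, if_true]
        rw [m3mul_assoc]
        conv_rhs => rw [← he]
        simp [m3pow]
      · have he : 2 * (e / 2) = e := by omega
        simp [hodd, he]

-- the state vector and the action of a matrix on it
def applyV (X : Mat3) (v : Int × Int × Int) : Int × Int × Int :=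
  (X.m00 * v.1 + X.m01 * v.2.1 + X.m02 * v.2.2,
   X.m10 * v.1 + X.m11 * v.2.1 + X.m12 * v.2.2,
   X.m20 * v.1 + X.m21 * v.2.1 + X.m22 * v.2.2)

def stepT (s : Int × Int × Int) : Int × Int × Int := (s.2.1, s.2.2, s.2.2 + s.1)

theorem step_applyV (X : Mat3) (v : Int × Int × Int) :
    stepT (applyV X v) = applyV (m3mul matM X) v := by
  cases X
  simp only [stepT, applyV, m3mul, matM, Prod.mk.injEq]
  refine ⟨?_, ?_, ?_⟩ <;> ring

theorem iterate_step (n : Nat) (v : Int × Int × Int) :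
    stepT^[n] v = applyV (m3pow matM n) v := by
  induction n with
  | zero => cases v with | mk a s => cases s; simp [applyV, m3pow, matI]
  | succ n ih =>
    rw [Function.iterate_succ_apply', ih, step_applyV]
    rfl

theorem foldl_const_iterate {α β : Type} (f : β → β) :
    ∀ (l : List α) (s : β), List.foldl (fun s _ => f s) s l = f^[l.length] s := by
  intro l
  induction l with
  | nil => intro s; rfl
  | cons x xs ih =>
    intro s
    simp only [List.foldl_cons, List.length_cons, ih, Function.iterate_succ_apply]

-- ===== VERDICT (by name: the statement is the Claim_ definition above) =====
theorem compute_sequence_spec : Claim_equal_compute_sequence := by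
  intro k _
  unfold Spec_compute_sequence compute_sequence compute_sequence_alt
  by_cases hle : k ≤ 3
  · -- A's loop is empty here (range(4, k+1) = []), both sides return 1
    simp only [hle, if_true]
    rcases (by omega : k = 1 ∨ k = 2 ∨ k = 3 ∨ ¬(k = 1 ∨ k = 2 ∨ k = 3)) with h | h | h | h
    · simp [h]
    · simp [h]
    · simp [h]
    · simp only [h, if_false]
      rw [PySem.List.pyRange_one_eq_nil (by omega)]
      rfl
  · -- k ≥ 4: A's loop runs (k-3) times; both equal the matrix power result
    have hk : ¬(k = 1 ∨ k = 2 ∨ k = 3) := by omega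
    simp only [hk, hle, if_false]
    have hfold := foldl_const_iterate stepT (PySem.List.pyRange 4 (k + 1) 1)
      ((1 : Int), (1 : Int), (1 : Int))
    simp only [stepT] at hfold
    rw [hfold, PySem.List.length_pyRange_one]
    have hn : (k + 1 - 4).toNat = (k - 3).toNat := by omega
    rw [hn, iterate_step, powAux_eq, m3mul_one_left]
    rcases m3pow matM (k - 3).toNat with ⟨a, b, c, d, e, f, g, h', i⟩
    simp [applyV]
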